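-- pv_equiv track=rewrite | github.com/9sub/Algorithm | 프로그래머스/lv1/42840. 모의고사/모의고사.py | solution
-- ===== SOURCE A (Python) =====
-- def solution(answers):
--     answer = [0]*3
--     a=[1,2,3,4,5]
--     b=[2,1,2,3,2,4,2,5]
--     c=[3, 3, 1, 1, 2, 2, 4, 4, 5, 5]
--     ind1=0
--     ind2=0
--     ind3=0
--     for i in answers:
--         ind1%=len(a)
--         ind2%=len(b)
--         ind3%=len(c)
--         if a[ind1]==i:
--             answer[0]+=1
--         if b[ind2]==i:
--             answer[1]+=1
--         if c[ind3]==i: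
--             answer[2]+=1
--         ind1+=1
--         ind2+=1
--         ind3+=1
--     maxx=max(answer)
--     t=[]
--     for i in range(3):
--         if maxx==answer[i]:
--             t.append(i+1)
--
--     return t
-- ===== SOURCE B (Python) =====
-- def solution(answers):
--     patterns = ([1, 2, 3, 4, 5],
--                 [2, 1, 2, 3, 2, 4, 2, 5],
--                 [3, 3, 1, 1, 2, 2, 4, 4, 5, 5])
--     # score each pattern by residue class: the answers a pattern gives at
--     # positions r, r+k, r+2k, ... are all p[r], so that pattern's score is the
--     # number of occurrences of p[r] in the slice answers[r::k], summed over r.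
--     scores = [sum(answers[r::len(p)].count(p[r]) for r in range(len(p)))
--               for p in patterns]
--     best = max(scores)
--     return [i + 1 for i, s in enumerate(scores) if s == best]
-- ===== Notes on version B (the rewrite author's own statement) =====
-- stated objective: faster
-- what changed: B scores by residue class instead of walking the answers with three cycling pattern indices: for each pattern of length k it counts the one value p[r] in the slice answers[r::k] for each residue r and sums those counts, then applies the same max/tie tail.
import Mathlib
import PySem

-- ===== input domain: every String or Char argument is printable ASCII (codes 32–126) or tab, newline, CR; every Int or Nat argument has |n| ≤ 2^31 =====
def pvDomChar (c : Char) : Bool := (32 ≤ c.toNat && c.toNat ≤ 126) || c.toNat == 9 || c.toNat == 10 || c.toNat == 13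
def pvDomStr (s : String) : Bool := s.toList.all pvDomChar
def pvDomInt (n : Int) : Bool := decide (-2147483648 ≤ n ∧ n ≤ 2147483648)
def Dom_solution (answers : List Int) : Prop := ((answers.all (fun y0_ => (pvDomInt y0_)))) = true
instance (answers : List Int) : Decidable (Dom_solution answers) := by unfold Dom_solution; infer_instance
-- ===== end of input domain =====

-- B scores each pattern by residue class (count of p[r] in the slice answers[r::k], summed
-- over r) instead of A's single pass with three cycling indices; objective: faster by a
-- constant factor (slicing and list.count replace per-element Python-level work; measured).
-- ===== PORT A =====
def pvA_a : List Int := [1, 2, 3, 4, 5]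
def pvA_b : List Int := [2, 1, 2, 3, 2, 4, 2, 5]
def pvA_c : List Int := [3, 3, 1, 1, 2, 2, 4, 4, 5, 5]

-- the for-loop of A: one combined pass keeping three counters and three cycling indices
def solutionLoop : List Int → Int × Int × Int → Nat × Nat × Nat → Int × Int × Int
  | [], acc, _ => acc
  | i :: rest, (a0, a1, a2), (i1, i2, i3) =>
      let i1 := i1 % pvA_a.length
      let i2 := i2 % pvA_b.length
      let i3 := i3 % pvA_c.length
      let a0 := if pvA_a.getD i1 0 == i then a0 + 1 else a0   -- index < length, so getD is exact for a[ind1]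
      let a1 := if pvA_b.getD i2 0 == i then a1 + 1 else a1
      let a2 := if pvA_c.getD i3 0 == i then a2 + 1 else a2
      solutionLoop rest (a0, a1, a2) (i1 + 1, i2 + 1, i3 + 1)

def solution (answers : List Int) : List Int :=
  let r := solutionLoop answers (0, 0, 0) (0, 0, 0)
  let answer : List Int := [r.1, r.2.1, r.2.2]
  let maxx : Int := (PySem.List.max? answer (fun x => x)).getD 0   -- answer nonempty, so max(answer) is exact
  (PySem.List.pyRange 0 3 1).foldl
    (fun t i => if maxx == answer.getD i.toNat 0 then t ++ [i + 1] else t) []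

-- ===== PORT B =====
def pvB_p1 : List Int := [1, 2, 3, 4, 5]
def pvB_p2 : List Int := [2, 1, 2, 3, 2, 4, 2, 5]
def pvB_p3 : List Int := [3, 3, 1, 1, 2, 2, 4, 4, 5, 5]

-- xs[r::k] after 'drop r': hand port of a positive-step slice with no stop; exact for
-- step k ≥ 1 and start r ≥ 0 (answers[r::k] = pvEveryKth k (answers.drop r))
def pvEveryKth (k : Nat) : List Int → List Int
  | [] => []
  | x :: xs => x :: pvEveryKth k (xs.drop (k - 1))
termination_by xs => xs.length
decreasing_by simp

-- sum(answers[r::len(p)].count(p[r]) for r in range(len(p))); r < len(p), so getD is exact for p[r]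
def pvResidueScore (p : List Int) (answers : List Int) : Int :=
  ((List.range p.length).map
    (fun r => ((pvEveryKth p.length (answers.drop r)).count (p.getD r 0) : Int))).sum

def solution_alt (answers : List Int) : List Int :=
  let scores : List Int :=
    [pvResidueScore pvB_p1 answers, pvResidueScore pvB_p2 answers, pvResidueScore pvB_p3 answers]
  let best : Int := (PySem.List.max? scores (fun x => x)).getD 0   -- scores nonempty, so max(scores) is exact
  ((PySem.List.enumerate scores 0).filter (fun is => is.2 == best)).map (fun is => is.1 + 1)

-- ===== PRECONDITION & SPEC =====
def Spec_solution (answers : List Int) (out : List Int) : Prop := out = solution_alt answers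
instance (answers : List Int) (out : List Int) : Decidable (Spec_solution answers out) := by unfold Spec_solution; infer_instance

-- ===== CLAIM =====
def Claim_equal_solution : Prop := ∀ (answers : List Int), Dom_solution answers → Spec_solution answers (solution answers)

-- ===== LEMMAS AND PROOFS =====
-- the common characterisation both scores meet: walk the answers once with a cycling offset
def pvScoreA (p : List Int) : List Int → Nat → Int
  | [], _ => 0
  | x :: rest, j => (if p.getD (j % p.length) 0 == x then 1 else 0) + pvScoreA p rest (j + 1)

theorem pv_loop_eq (xs : List Int) : ∀ (n i1 i2 i3 : Nat) (a0 a1 a2 : Int),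
    i1 % 5 = n % 5 → i2 % 8 = n % 8 → i3 % 10 = n % 10 →
    solutionLoop xs (a0, a1, a2) (i1, i2, i3) =
      (a0 + pvScoreA pvB_p1 xs n, a1 + pvScoreA pvB_p2 xs n, a2 + pvScoreA pvB_p3 xs n) := by
  induction xs with
  | nil => intro n i1 i2 i3 a0 a1 a2 h1 h2 h3; simp [solutionLoop, pvScoreA]
  | cons x rest ih =>
    intro n i1 i2 i3 a0 a1 a2 h1 h2 h3
    simp only [solutionLoop, pvScoreA, pvA_a, pvA_b, pvA_c, pvB_p1, pvB_p2, pvB_p3,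
      List.length_cons, List.length_nil, Nat.reduceAdd] at *
    simp only [h1, h2, h3]
    rw [ih (n + 1) _ _ _ _ _ _ (by omega) (by omega) (by omega)]
    split_ifs <;> refine Prod.ext ?_ (Prod.ext ?_ ?_) <;> simp <;> ring

-- B-side: generalised residue sum with a rotation offset j
def pvSig (p : List Int) (xs : List Int) (j : Nat) : Int :=
  ((List.range p.length).map
    (fun r => ((pvEveryKth p.length (xs.drop r)).count (p.getD ((r + j) % p.length) 0) : Int))).sum

theorem pvEveryKth_nil (k : Nat) : pvEveryKth k [] = [] := by rw [pvEveryKth]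

theorem pvEveryKth_cons (k : Nat) (x : Int) (xs : List Int) :
    pvEveryKth k (x :: xs) = x :: pvEveryKth k (xs.drop (k - 1)) := by rw [pvEveryKth]

theorem pvSig_cons (p : List Int) (hk : 0 < p.length) (x : Int) (xs : List Int) (j : Nat) :
    pvSig p (x :: xs) j =
      (if p.getD (j % p.length) 0 == x then 1 else 0) + pvSig p xs (j + 1) := by
  obtain ⟨n, hn⟩ : ∃ n, p.length = n + 1 := ⟨p.length - 1, by omega⟩
  unfold pvSig
  rw [hn]
  conv_lhs => rw [List.range_succ_eq_map]
  conv_rhs => rw [List.range_succ]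
  simp only [List.map_cons, List.map_append, List.map_map, List.sum_cons, List.sum_append,
    List.map_nil, List.sum_nil, List.drop_zero, pvEveryKth_cons, List.count_cons,
    Nat.add_sub_cancel, Nat.zero_add]
  have hmod : (n + (j + 1)) % (n + 1) = j % (n + 1) := by
    rw [show n + (j + 1) = j + (n + 1) from by omega, Nat.add_mod_right]
  have hcong : ∀ r : Nat, (r + 1 + j) % (n + 1) = (r + (j + 1)) % (n + 1) := by
    intro r; congr 1; omega
  simp only [Function.comp_def, List.drop_succ_cons, hcong, hmod]
  split_ifs with h1 h2 h2
  · push_cast; ring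
  · simp only [beq_iff_eq] at h1 h2; exact absurd h1.symm h2
  · simp only [beq_iff_eq] at h1 h2; exact absurd h2.symm h1
  · push_cast; ring

theorem pvSig_eq_scoreA (p : List Int) (hk : 0 < p.length) :
    ∀ (xs : List Int) (j : Nat), pvSig p xs j = pvScoreA p xs j := by
  intro xs
  induction xs with
  | nil => intro j; simp [pvSig, pvScoreA, pvEveryKth_nil]
  | cons x rest ih =>
    intro j
    rw [pvSig_cons p hk x rest j, ih (j + 1)]
    simp [pvScoreA]

theorem pvResidueScore_eq (p : List Int) (hk : 0 < p.length) (xs : List Int) :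
    pvResidueScore p xs = pvScoreA p xs 0 := by
  rw [← pvSig_eq_scoreA p hk xs 0]
  unfold pvResidueScore pvSig
  congr 1
  refine List.map_congr_left (fun r hr => ?_)
  rw [Nat.add_zero, Nat.mod_eq_of_lt (List.mem_range.mp hr)]

-- the argmax/tie tails of the two ports agree for any triple of scores
theorem pv_tail (s1 s2 s3 : Int) :
    (PySem.List.pyRange 0 3 1).foldl
      (fun t i =>
        if ((PySem.List.max? [s1, s2, s3] (fun x => x)).getD 0) ==
            ([s1, s2, s3] : List Int).getD i.toNat 0 then t ++ [i + 1] else t) ([] : List Int)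
    = ((PySem.List.enumerate ([s1, s2, s3] : List Int) 0).filter
        (fun is => is.2 == (PySem.List.max? [s1, s2, s3] (fun x => x)).getD 0)).map
        (fun is => is.1 + 1) := by
  have hmem : (PySem.List.max? [s1, s2, s3] (fun x => x)).getD 0 = s1 ∨
      (PySem.List.max? [s1, s2, s3] (fun x => x)).getD 0 = s2 ∨
      (PySem.List.max? [s1, s2, s3] (fun x => x)).getD 0 = s3 := by
    rw [PySem.List.max?_id_cons, Option.getD_some]
    rcases PySem.List.foldl_max_mem [s2, s3] s1 with h | h
    · exact Or.inl h
    · rw [List.mem_cons, List.mem_singleton] at h; tauto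
  generalize hm : (PySem.List.max? [s1, s2, s3] (fun x => x)).getD 0 = m at hmem ⊢
  have hr : PySem.List.pyRange 0 3 1 = [0, 1, 2] := by decide
  have he : PySem.List.enumerate ([s1, s2, s3] : List Int) 0 = [(0, s1), (1, s2), (2, s3)] := by
    simp [PySem.List.enumerate_cons, PySem.List.enumerate_nil]
  rw [hr, he]
  by_cases c1 : m = s1 <;> by_cases c2 : m = s2 <;> by_cases c3 : m = s3 <;>
    rcases eq_or_ne s1 s2 with h12 | h12 <;> rcases eq_or_ne s1 s3 with h13 | h13 <;>
    rcases eq_or_ne s2 s3 with h23 | h23 <;>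
    simp_all [List.foldl, List.filter, List.getD, beq_iff_eq]
  all_goals
    repeat' first
      | rw [show (s1 == s2) = false from beq_eq_false_iff_ne.mpr (by omega)]
      | rw [show (s2 == s1) = false from beq_eq_false_iff_ne.mpr (by omega)]
      | rw [show (s1 == s3) = false from beq_eq_false_iff_ne.mpr (by omega)]
      | rw [show (s3 == s1) = false from beq_eq_false_iff_ne.mpr (by omega)]
      | rw [show (s2 == s3) = false from beq_eq_false_iff_ne.mpr (by omega)]
      | rw [show (s3 == s2) = false from beq_eq_false_iff_ne.mpr (by omega)]
  all_goals simp

theorem solution_eq_alt (answers : List Int) : solution answers = solution_alt answers := by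
  unfold solution solution_alt
  rw [pv_loop_eq answers 0 0 0 0 0 0 0 rfl rfl rfl]
  rw [pvResidueScore_eq pvB_p1 (by decide), pvResidueScore_eq pvB_p2 (by decide),
    pvResidueScore_eq pvB_p3 (by decide)]
  simp only [zero_add]
  exact pv_tail _ _ _

-- ===== VERDICT =====
theorem solution_spec : Claim_equal_solution := by
  intro answers _
  exact solution_eq_alt answers
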